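-- pv_equiv track=rewrite | github.com/emboyce/PY110 | Small_Problems/Easy5/q1-end.py | staggered_case2
-- ===== SOURCE A (Python) =====
-- def staggered_case2(string):
--     switch = True
--     new_string = ""
--     for char in string:
--         if switch == True:
--             new_string += char.upper()
--             if char.isalpha():
--                 switch = False
--         else:
--             new_string += char.lower()
--             if char.isalpha():
--                 switch = True
--     return new_string
-- ===== SOURCE B (Python) =====
-- def staggered_case2(string):
--     chars = list(string.upper())
--     alpha_positions = [i for i, ch in enumerate(string) if ch.isalpha()]
--     for k in range(1, len(alpha_positions), 2):
--         chars[alpha_positions[k]] = string[alpha_positions[k]].lower()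
--     return ''.join(chars)
-- ===== Notes on version B (the rewrite author's own statement) =====
-- stated objective: alternative
-- what changed: B replaces A's single-pass case-toggling state machine by staged passes: uppercase the whole string, collect the indices of alphabetic characters, then lowercase the characters at every second collected index.
import Mathlib
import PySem

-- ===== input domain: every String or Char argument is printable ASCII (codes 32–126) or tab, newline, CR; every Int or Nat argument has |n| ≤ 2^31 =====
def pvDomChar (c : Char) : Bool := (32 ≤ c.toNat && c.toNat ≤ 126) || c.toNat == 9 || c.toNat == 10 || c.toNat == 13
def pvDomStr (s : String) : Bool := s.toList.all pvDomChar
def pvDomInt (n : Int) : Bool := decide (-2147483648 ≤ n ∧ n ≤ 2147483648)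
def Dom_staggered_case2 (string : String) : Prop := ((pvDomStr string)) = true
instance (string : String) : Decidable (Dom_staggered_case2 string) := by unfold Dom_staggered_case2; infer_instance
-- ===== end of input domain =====

-- B replaces A's single-pass toggling state machine by staged passes (uppercase all,
-- collect alphabetic indices, lowercase every second one); same O(n) cost, no speed claim.

-- ===== PORT A =====
-- A: one fold carrying (switch, new_string); every char gets upper()/lower() applied,
-- switch flips only on alphabetic chars.
def staggered_case2 (string : String) : String :=
  (string.toList.foldl
    (fun (st : Bool × List Char) c =>
      if st.1 = true then
        ((if PySem.Chars.isalpha c then false else st.1), st.2 ++ [PySem.Chars.upperChar c])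
      else
        ((if PySem.Chars.isalpha c then true else st.1), st.2 ++ [PySem.Chars.lowerChar c]))
    (true, [])).2.asString

-- ===== PORT B =====
-- B, staged: chars = list(string.upper()); alpha_positions = [i for i, ch in enumerate(string)
-- if ch.isalpha()]; for k in range(1, len(alpha_positions), 2):
--   chars[alpha_positions[k]] = string[alpha_positions[k]].lower(); return ''.join(chars)
-- (pyGetD/pySetD are the total variants; every index used is provably in range.)
def staggered_case2_alt (string : String) : String :=
  let l := string.toList
  let chars := PySem.Chars.upper l
  let alphaPositions :=
    ((PySem.List.enumerate l 0).filter (fun p => PySem.Chars.isalpha p.2)).map Prod.fst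
  ((PySem.List.pyRange 1 (alphaPositions.length : Int) 2).foldl
    (fun cs k =>
      PySem.List.pySetD cs (PySem.List.pyGetD alphaPositions k 0)
        (PySem.Chars.lowerChar (PySem.List.pyGetD l (PySem.List.pyGetD alphaPositions k 0) ' ')))
    chars).asString

-- ===== PRECONDITION & SPEC =====
def Spec_staggered_case2 (string : String) (out : String) : Prop := out = staggered_case2_alt string
instance (string : String) (out : String) : Decidable (Spec_staggered_case2 string out) := by unfold Spec_staggered_case2; infer_instance

-- ===== CLAIM (what is proved, stated in full; the proofs are below) =====
def Claim_equal_staggered_case2 : Prop := ∀ (string : String), Dom_staggered_case2 string → Spec_staggered_case2 string (staggered_case2 string)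

-- ===== LEMMAS AND PROOFS =====

-- the common description of both outputs: char i is upper-/lower-cased by the parity of
-- (n + number of alphabetic chars before it)
def pvSpecMap : Nat → List Char → List Char
  | _, [] => []
  | n, c :: cs =>
      (if n % 2 = 0 then PySem.Chars.upperChar c else PySem.Chars.lowerChar c)
        :: pvSpecMap (n + if PySem.Chars.isalpha c then 1 else 0) cs

theorem pvUpperChar_of_not_alpha (c : Char) (h : PySem.Chars.isalpha c = false) :
    PySem.Chars.upperChar c = c := by
  simp [PySem.Chars.isalpha] at h
  simp [PySem.Chars.upperChar, h.2]

theorem pvLowerChar_of_not_alpha (c : Char) (h : PySem.Chars.isalpha c = false) :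
    PySem.Chars.lowerChar c = c := by
  simp [PySem.Chars.isalpha] at h
  simp [PySem.Chars.lowerChar, h.1]

theorem pvSpecMap_length (n : Nat) (l : List Char) : (pvSpecMap n l).length = l.length := by
  induction l generalizing n with
  | nil => rfl
  | cons c cs ih => simp [pvSpecMap, ih]

theorem pvSpecMap_append (l : List Char) (c : Char) (n : Nat) :
    pvSpecMap n (l ++ [c]) =
      pvSpecMap n l ++
        [if (n + l.countP (fun c => PySem.Chars.isalpha c)) % 2 = 0 then
            PySem.Chars.upperChar c else PySem.Chars.lowerChar c] := by
  induction l generalizing n with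
  | nil => simp [pvSpecMap]
  | cons d ds ih =>
      by_cases hd : PySem.Chars.isalpha d = true
      · simp [pvSpecMap, hd, ih, Nat.add_assoc, Nat.add_comm 1]
      · have hd' : PySem.Chars.isalpha d = false := by simpa using hd
        simp [pvSpecMap, hd', ih]

-- A's loop produces pvSpecMap
theorem pvA_fold (l : List Char) (n : Nat) (acc : List Char) :
    (l.foldl
      (fun (st : Bool × List Char) c =>
        if st.1 = true then
          ((if PySem.Chars.isalpha c then false else st.1), st.2 ++ [PySem.Chars.upperChar c])
        else
          ((if PySem.Chars.isalpha c then true else st.1), st.2 ++ [PySem.Chars.lowerChar c]))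
      (decide (n % 2 = 0), acc)).2 = acc ++ pvSpecMap n l := by
  induction l generalizing n acc with
  | nil => simp [pvSpecMap]
  | cons c cs ih =>
      simp only [List.foldl_cons]
      by_cases ha : PySem.Chars.isalpha c = true
      · by_cases hn : n % 2 = 0
        · have h2 : ¬ (n + 1) % 2 = 0 := by omega
          simpa [ha, hn, h2, pvSpecMap] using ih (n + 1) (acc ++ [PySem.Chars.upperChar c])
        · have h2 : (n + 1) % 2 = 0 := by omega
          simpa [ha, hn, h2, pvSpecMap] using ih (n + 1) (acc ++ [PySem.Chars.lowerChar c])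
      · have ha' : PySem.Chars.isalpha c = false := by simpa using ha
        by_cases hn : n % 2 = 0
        · simpa [ha', hn, pvSpecMap] using ih n (acc ++ [PySem.Chars.upperChar c])
        · simpa [ha', hn, pvSpecMap] using ih n (acc ++ [PySem.Chars.lowerChar c])

-- B's alpha-position list
def pvPos (l : List Char) : List Int :=
  ((PySem.List.enumerate l 0).filter (fun p => PySem.Chars.isalpha p.2)).map Prod.fst

theorem pvPos_append (l : List Char) (c : Char) :
    pvPos (l ++ [c]) =
      pvPos l ++ (if PySem.Chars.isalpha c then [(l.length : Int)] else []) := by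
  unfold pvPos
  rw [PySem.List.enumerate_append]
  by_cases hc : PySem.Chars.isalpha c = true <;>
    simp [PySem.List.enumerate, hc]

theorem pvPos_mem (l : List Char) (x : Int) (hx : x ∈ pvPos l) :
    ∃ j : Nat, x = (j : Int) ∧ j < l.length := by
  unfold pvPos at hx
  rcases List.mem_map.1 hx with ⟨p, hp, rfl⟩
  rcases (PySem.List.mem_enumerate_iff l 0 p).1 (List.mem_filter.1 hp).1 with ⟨k, hk, rfl⟩
  exact ⟨k, by simp, hk⟩

theorem pvPos_length (l : List Char) :
    (pvPos l).length = l.countP (fun c => PySem.Chars.isalpha c) := by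
  unfold pvPos
  rw [List.length_map]
  rw [← List.countP_eq_length_filter]
  conv_rhs => rw [← PySem.List.map_snd_enumerate l 0]
  rw [List.countP_map]
  rfl

-- range(1, m+1, 2) versus range(1, m, 2)
theorem pvRange_step (m : Nat) :
    PySem.List.pyRange 1 ((m : Int) + 1) 2 =
      PySem.List.pyRange 1 (m : Int) 2 ++ (if m % 2 = 1 then [(m : Int)] else []) := by
  rw [PySem.List.pyRange_of_pos 1 ((m : Int) + 1) (by norm_num),
      PySem.List.pyRange_of_pos 1 (m : Int) (by norm_num)]
  rcases Nat.eq_zero_or_pos m with hm | hm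
  · subst hm; simp
  · have h1 : (1 : Int) < (m : Int) + 1 := by omega
    have e1 : (((m : Int) + 1 - 1 + 2 - 1) / 2).toNat = (m + 1) / 2 := by omega
    rw [if_pos h1, e1]
    by_cases hpar : m % 2 = 1
    · have e2 : (m + 1) / 2 = m / 2 + 1 := by omega
      rw [e2, List.range_succ, List.map_append]
      have e3 : (1 : Int) + 2 * ((m / 2 : Nat) : Int) = (m : Int) := by omega
      by_cases h2 : (1 : Int) < (m : Int)
      · have e4 : (((m : Int) - 1 + 2 - 1) / 2).toNat = m / 2 := by omega
        simp [h2, e4, hpar]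
        omega
      · have : m = 1 := by omega
        subst this
        simp [hpar]
    · have h2 : (1 : Int) < (m : Int) := by omega
      have e4 : (((m : Int) - 1 + 2 - 1) / 2).toNat = m / 2 := by omega
      have e2 : (m + 1) / 2 = m / 2 := by omega
      simp [h2, e4, e2, hpar]

-- writing independent values at in-range positions commutes with appending a char
theorem pvFold_append (K : List Int) (f : Int → Int) (g : Int → Char) (base : List Char)
    (x : Char) (h : ∀ k ∈ K, 0 ≤ f k ∧ (f k).toNat < base.length) :
    K.foldl (fun cs k => PySem.List.pySetD cs (f k) (g k)) (base ++ [x])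
      = (K.foldl (fun cs k => PySem.List.pySetD cs (f k) (g k)) base) ++ [x] := by
  induction K generalizing base with
  | nil => rfl
  | cons k ks ih =>
      obtain ⟨h0, hlt⟩ := h k (List.mem_cons_self ..)
      simp only [List.foldl_cons]
      rw [PySem.List.pySetD_of_nonneg _ _ h0, PySem.List.pySetD_of_nonneg _ _ h0,
          List.set_append, if_pos hlt]
      exact ih _ (fun k' hk' => by
        simpa [List.length_set] using h k' (List.mem_cons_of_mem _ hk'))

theorem pvGetD_mem {α : Type} (xs : List α) (n : Nat) (d : α) (h : n < xs.length) :
    xs.getD n d ∈ xs := by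
  rw [List.getD_eq_getElem?_getD, List.getElem?_eq_getElem h]
  exact List.getElem_mem h

-- B's staged passes also produce pvSpecMap
theorem pvB_eq_spec (l : List Char) :
    (PySem.List.pyRange 1 ((pvPos l).length : Int) 2).foldl
      (fun cs k =>
        PySem.List.pySetD cs (PySem.List.pyGetD (pvPos l) k 0)
          (PySem.Chars.lowerChar (PySem.List.pyGetD l (PySem.List.pyGetD (pvPos l) k 0) ' ')))
      (PySem.Chars.upper l) = pvSpecMap 0 l := by
  induction l using List.reverseRecOn with
  | nil => rfl
  | append_singleton l c ih =>
      -- the fold over range(1, (pvPos l).length, 2) reads only in-range prefix data,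
      -- so it is the same fold as on l, applied under the appended last char
      have hmem : ∀ k ∈ PySem.List.pyRange 1 (((pvPos l).length : Int)) 2,
          0 ≤ k ∧ k.toNat < (pvPos l).length := by
        intro k hk
        rcases (PySem.List.mem_pyRange_iff_of_pos (by norm_num) k).1 hk with ⟨h1, h2, _⟩
        constructor
        · omega
        · omega
      have hgetPos : ∀ (tail : List Int) k, k ∈ PySem.List.pyRange 1 (((pvPos l).length : Int)) 2 →
          PySem.List.pyGetD (pvPos l ++ tail) k 0 = PySem.List.pyGetD (pvPos l) k 0 := by
        intro tail k hk
        obtain ⟨h0, hlt⟩ := hmem k hk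
        rw [PySem.List.pyGetD_of_nonneg _ _ h0, PySem.List.pyGetD_of_nonneg _ _ h0,
            List.getD_append _ _ _ _ hlt]
      have hgetL : ∀ k, k ∈ PySem.List.pyRange 1 (((pvPos l).length : Int)) 2 →
          PySem.List.pyGetD (l ++ [c]) (PySem.List.pyGetD (pvPos l) k 0) ' '
            = PySem.List.pyGetD l (PySem.List.pyGetD (pvPos l) k 0) ' ' := by
        intro k hk
        obtain ⟨h0, hlt⟩ := hmem k hk
        have hp : PySem.List.pyGetD (pvPos l) k 0 ∈ pvPos l := by
          rw [PySem.List.pyGetD_of_nonneg _ _ h0]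
          exact pvGetD_mem _ _ _ hlt
        rcases pvPos_mem l _ hp with ⟨j, hj, hjlt⟩
        rw [hj, PySem.List.pyGetD_of_nonneg _ _ (by omega),
            PySem.List.pyGetD_of_nonneg _ _ (by omega)]
        simp only [Int.toNat_natCast]
        exact List.getD_append _ _ _ _ hjlt
      have hbound : ∀ k ∈ PySem.List.pyRange 1 (((pvPos l).length : Int)) 2,
          0 ≤ PySem.List.pyGetD (pvPos l) k 0 ∧
            (PySem.List.pyGetD (pvPos l) k 0).toNat < (PySem.Chars.upper l).length := by
        intro k hk
        obtain ⟨h0, hlt⟩ := hmem k hk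
        have hp : PySem.List.pyGetD (pvPos l) k 0 ∈ pvPos l := by
          rw [PySem.List.pyGetD_of_nonneg _ _ h0]
          exact pvGetD_mem _ _ _ hlt
        rcases pvPos_mem l _ hp with ⟨j, hj, hjlt⟩
        constructor
        · omega
        · simp only [PySem.Chars.upper, List.length_map]
          omega
      -- shared prefix computation: the fold over range(1, (pvPos l).length, 2) on the
      -- extended data equals (fold on l's data) ++ [upperChar c]
      have hprefix : ∀ tail : List Int,
          (PySem.List.pyRange 1 (((pvPos l).length : Int)) 2).foldl
            (fun cs k =>
              PySem.List.pySetD cs (PySem.List.pyGetD (pvPos l ++ tail) k 0)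
                (PySem.Chars.lowerChar
                  (PySem.List.pyGetD (l ++ [c]) (PySem.List.pyGetD (pvPos l ++ tail) k 0) ' ')))
            (PySem.Chars.upper l ++ [PySem.Chars.upperChar c])
          = pvSpecMap 0 l ++ [PySem.Chars.upperChar c] := by
        intro tail
        rw [PySem.List.foldl_congr_mem _ _
            (fun cs k =>
              PySem.List.pySetD cs (PySem.List.pyGetD (pvPos l) k 0)
                (PySem.Chars.lowerChar
                  (PySem.List.pyGetD l (PySem.List.pyGetD (pvPos l) k 0) ' ')))
            _ (fun acc k hk => by rw [hgetPos tail k hk, hgetL k hk])]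
        rw [pvFold_append _ _ _ _ _ hbound, ih]
      have hupper : PySem.Chars.upper (l ++ [c])
          = PySem.Chars.upper l ++ [PySem.Chars.upperChar c] := by
        simp [PySem.Chars.upper]
      by_cases hc : PySem.Chars.isalpha c = true
      · have hpos' : pvPos (l ++ [c]) = pvPos l ++ [(l.length : Int)] := by
          rw [pvPos_append]; simp [hc]
        have hlen : ((pvPos l ++ [(l.length : Int)]).length : Int)
            = ((pvPos l).length : Int) + 1 := by
          push_cast [List.length_append, List.length_singleton]; ring
        by_cases hpar : (pvPos l).length % 2 = 1
        · -- odd: one extra write, at the new last position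
          rw [hupper, hpos', hlen, pvRange_step, if_pos hpar, List.foldl_append, hprefix]
          simp only [List.foldl_cons, List.foldl_nil]
          have hgm : PySem.List.pyGetD (pvPos l ++ [(l.length : Int)]) ((pvPos l).length : Int) 0
              = (l.length : Int) := by
            rw [PySem.List.pyGetD_of_nonneg _ _ (by omega)]
            simp [List.getD_eq_getElem?_getD]
          rw [hgm, PySem.List.pyGetD_of_nonneg _ _ (by omega),
              PySem.List.pySetD_of_nonneg _ _ (by omega)]
          simp only [Int.toNat_natCast]
          have hread : (l ++ [c]).getD l.length ' ' = c := by
            simp [List.getD_eq_getElem?_getD]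
          rw [hread, List.set_append, if_neg (by simp [pvSpecMap_length]),
              pvSpecMap_append]
          have : ¬ l.countP (fun c => PySem.Chars.isalpha c) % 2 = 0 := by
            rw [← pvPos_length]; omega
          simp [this, pvSpecMap_length]
        · -- even: the same writes as on l
          rw [hupper, hpos', hlen, pvRange_step, if_neg hpar, List.append_nil, hprefix,
              pvSpecMap_append]
          have : l.countP (fun c => PySem.Chars.isalpha c) % 2 = 0 := by
            rw [← pvPos_length]; omega
          simp [this]
      · have hc' : PySem.Chars.isalpha c = false := by simpa using hc
        have hpos' : pvPos (l ++ [c]) = pvPos l ++ [] := by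
          rw [pvPos_append]; simp [hc']
        have hp0 := hprefix []
        simp only [List.append_nil] at hp0
        rw [hupper, hpos', List.append_nil, hp0, pvSpecMap_append]
        by_cases hpar : (0 + l.countP (fun c => PySem.Chars.isalpha c)) % 2 = 0 <;>
          simp [pvUpperChar_of_not_alpha c hc', pvLowerChar_of_not_alpha c hc']

-- ===== VERDICT (by name: the statement is the Claim_ definition above) =====
theorem staggered_case2_spec : Claim_equal_staggered_case2 := by
  intro s _
  unfold Spec_staggered_case2 staggered_case2 staggered_case2_alt
  dsimp only
  have hA := pvA_fold s.toList 0 []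
  simp only [Nat.zero_mod, decide_true] at hA
  rw [hA, List.nil_append]
  have hB := pvB_eq_spec s.toList
  unfold pvPos at hB
  rw [hB]
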